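-- pv_equiv track=rewrite | github.com/ColeMatthewsGithub/Cole-Matthews-Portfolio | Python Course Assignments/test_plates/plates.py | zerostart
-- ===== SOURCE A (Python) =====
-- validnumbers = ['1','2','3','4','5','6','7','8','9','0']
--
-- def zerostart (string):
--  stringlength = len (string)
--  slidingcounter = 0
--  zerocounter = 0
--  zerospot = None
--  if any (iii in validnumbers for iii in string):
--     for iii in string [0:stringlength]:
--         if iii == '0':
--             zerospot = slidingcounter
--             break
--         slidingcounter+=1
--     for iiii in string [0:zerospot]:
--         if iiii in validnumbers:
--             zerocounter = 1
--     if zerocounter == 0: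
--         return True
--     else:
--         return False
-- ===== SOURCE B (Python) =====
-- validnumbers = ['1','2','3','4','5','6','7','8','9','0']
--
-- def zerostart(string):
--     for c in string:
--         if c in validnumbers:
--             return c == '0'
--     return None
-- ===== Notes on version B (the rewrite author's own statement) =====
-- stated objective: simpler
-- what changed: A's any()-over-the-string digit check, a counting loop locating the first zero digit, and a prefix scan for earlier digits are replaced by one early-returning pass that stops at the first digit and returns whether it is the zero digit (None if the string has no digit).
import Mathlib
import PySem

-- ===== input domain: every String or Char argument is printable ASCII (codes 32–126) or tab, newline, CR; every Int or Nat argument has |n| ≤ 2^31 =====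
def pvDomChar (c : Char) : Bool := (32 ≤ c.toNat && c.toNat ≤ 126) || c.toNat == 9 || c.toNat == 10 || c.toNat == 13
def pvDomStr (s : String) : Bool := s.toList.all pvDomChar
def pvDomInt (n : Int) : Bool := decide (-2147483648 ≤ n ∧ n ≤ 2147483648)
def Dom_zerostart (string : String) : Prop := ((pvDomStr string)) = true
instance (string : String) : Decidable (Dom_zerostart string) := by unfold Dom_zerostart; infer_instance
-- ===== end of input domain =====

-- B replaces A's any() check plus two scans by one early-returning pass over the string (simpler).


-- ===== PORT A =====
def pvValidnumbers : List Char := ['1','2','3','4','5','6','7','8','9','0']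

-- the first `for` loop of A: walks the slice with the sliding counter, breaking at the first '0'
def zsFindZero : List Char → Int → Option Int
  | [], _ => none
  | c :: r, i => if c = '0' then some i else zsFindZero r (i + 1)

def zerostartL (l : List Char) : Option Bool :=
  let stringlength : Int := l.length
  if l.any (fun c => pvValidnumbers.contains c) then
    let zerospot := zsFindZero (PySem.List.slice l (some 0) (some stringlength)) 0
    let pref := PySem.List.slice l (some 0) zerospot
    let zerocounter : Int :=
      pref.foldl (fun acc c => if pvValidnumbers.contains c then 1 else acc) 0
    if zerocounter = 0 then some true else some false
  else none

def zerostart (string : String) : Option Bool := zerostartL string.toList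

-- ===== PORT B =====
-- one early-returning pass: at the first digit decide, else fall through to None
def zsScan : List Char → Option Bool
  | [] => none
  | c :: r => if pvValidnumbers.contains c then some (c == '0') else zsScan r

def zerostart_alt (string : String) : Option Bool := zsScan string.toList

-- ===== PRECONDITION & SPEC =====
def Spec_zerostart (string : String) (out : Option Bool) : Prop := out = zerostart_alt string
instance (string : String) (out : Option Bool) : Decidable (Spec_zerostart string out) := by unfold Spec_zerostart; infer_instance

-- ===== CLAIM (what is proved, stated in full; the proofs are below) =====
def Claim_equal_zerostart : Prop := ∀ (string : String), Dom_zerostart string → Spec_zerostart string (zerostart string)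

-- ===== LEMMAS AND PROOFS =====
def zsPrefOf (l : List Char) : List Char :=
  match l.findIdx? (· = '0') with
  | none => l
  | some n => l.take n

theorem zsFindZero_eq (l : List Char) (i : Int) :
    zsFindZero l i = (l.findIdx? (· = '0')).map (fun n => i + n) := by
  induction l generalizing i with
  | nil => simp [zsFindZero]
  | cons c r ih =>
    by_cases h : c = '0'
    · simp [zsFindZero, h, List.findIdx?_cons]
    · simp only [zsFindZero, List.findIdx?_cons, h, decide_eq_true_eq, if_false, ih]
      cases hf : r.findIdx? (· = '0') with
      | none => simp
      | some n => simp; ring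

theorem zsFold_eq (pref : List Char) (z : Int) :
    pref.foldl (fun acc c => if pvValidnumbers.contains c then 1 else acc) z
      = if pref.any (fun c => pvValidnumbers.contains c) then 1 else z := by
  induction pref generalizing z with
  | nil => simp
  | cons c r ih =>
    simp only [List.foldl_cons, List.any_cons, ih]
    by_cases h : c ∈ pvValidnumbers <;> simp [h]

theorem zerostartL_char (l : List Char) :
    zerostartL l
      = if l.any (fun c => pvValidnumbers.contains c) then
          some (!(zsPrefOf l).any (fun c => pvValidnumbers.contains c))
        else none := by
  by_cases h : l.any (fun c => pvValidnumbers.contains c)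
  · simp only [zerostartL, h, if_true]
    have hs : PySem.List.slice l (some 0) (some (l.length : Int)) = l := by
      simp [PySem.List.slice_to_natCast]
    rw [hs, zsFindZero_eq]
    cases hf : l.findIdx? (· = '0') with
    | none =>
      simp only [PySem.List.slice_zero_start, zsFold_eq, h, zsPrefOf, hf]
      simpa using h
    | some n =>
      simp only [zero_add, PySem.List.slice_zero_start, zsFold_eq, zsPrefOf, hf]
      split_ifs with h1 h2 h2 <;> simp_all
  · rw [Bool.not_eq_true] at h
    simp only [zerostartL, h, Bool.false_eq_true, if_false]

theorem zsScan_char (l : List Char) :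
    zsScan l
      = if l.any (fun c => pvValidnumbers.contains c) then
          some (!(zsPrefOf l).any (fun c => pvValidnumbers.contains c))
        else none := by
  induction l with
  | nil => simp [zsScan]
  | cons c r ih =>
    by_cases hd : pvValidnumbers.contains c
    · simp only [zsScan, hd, if_true, List.any_cons, Bool.true_or]
      by_cases hz : c = '0'
      · subst hz
        simp [zsPrefOf, List.findIdx?_cons]
      · have hcz : (c == '0') = false := by simp [hz]
        have : zsPrefOf (c :: r) = c :: zsPrefOf r := by
          simp only [zsPrefOf, List.findIdx?_cons, hz, decide_false]
          cases hf : r.findIdx? (· = '0') <;> simp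
        have hm : c ∈ pvValidnumbers := by simpa using hd
        simp [this, hcz]
        exact fun hc => absurd hm hc
    · have hcz : c ≠ '0' := by
        intro he; subst he; simp [pvValidnumbers] at hd
      have hp : zsPrefOf (c :: r) = c :: zsPrefOf r := by
        simp only [zsPrefOf, List.findIdx?_cons, hcz, decide_false]
        cases hf : r.findIdx? (· = '0') <;> simp
      simp only [zsScan, hd, ih, List.any_cons, Bool.false_or, hp]
      cases h : r.any (fun c => pvValidnumbers.contains c) <;> simp

-- ===== VERDICT (by name: the statement is the Claim_ definition above) =====
theorem zerostart_spec : Claim_equal_zerostart := by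
  intro s _
  unfold Spec_zerostart zerostart zerostart_alt
  rw [zerostartL_char, zsScan_char]
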